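-- pv_equiv track=rewrite | github.com/PennyLaneAI/generative-quantum-states | src/data/models/random_heisenberg/couplings.py | _square_lattice
-- ===== SOURCE A (Python) =====
-- import itertools as it
--
-- def _square_lattice(n_rows, n_cols, periodic_boundary=False):
--     """Generate a 2D square lattice of n_rows and n_cols."""
--     n_qubits = n_rows * n_cols
--     edges = [(si, sj) for (si, sj) in it.combinations(range(n_qubits), 2)
--              if ((sj % n_cols > 0) and sj - si == 1) or sj - si == n_cols]
--
--     if periodic_boundary:
--         raise NotImplementedError(
--             "periodic boundary conditions not implemented yet for square lattice")
--
--     return edges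
-- ===== SOURCE B (Python) =====
-- def _square_lattice(n_rows, n_cols, periodic_boundary=False):
--     """Generate a 2D square lattice of n_rows and n_cols."""
--     if periodic_boundary:
--         raise NotImplementedError(
--             "periodic boundary conditions not implemented yet for square lattice")
--     edges = []
--     for i in range(n_rows):
--         for j in range(n_cols):
--             s = i * n_cols + j
--             if j < n_cols - 1:
--                 edges.append((s, s + 1))
--             if i < n_rows - 1:
--                 edges.append((s, s + n_cols))
--     return edges
-- ===== Notes on version B (the rewrite author's own statement) =====
-- stated objective: alternative
-- what changed: Replaces the filter over all combinations of qubit pairs by a direct double loop over rows and columns that emits each vertex's right and down neighbor edges.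
import Mathlib
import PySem

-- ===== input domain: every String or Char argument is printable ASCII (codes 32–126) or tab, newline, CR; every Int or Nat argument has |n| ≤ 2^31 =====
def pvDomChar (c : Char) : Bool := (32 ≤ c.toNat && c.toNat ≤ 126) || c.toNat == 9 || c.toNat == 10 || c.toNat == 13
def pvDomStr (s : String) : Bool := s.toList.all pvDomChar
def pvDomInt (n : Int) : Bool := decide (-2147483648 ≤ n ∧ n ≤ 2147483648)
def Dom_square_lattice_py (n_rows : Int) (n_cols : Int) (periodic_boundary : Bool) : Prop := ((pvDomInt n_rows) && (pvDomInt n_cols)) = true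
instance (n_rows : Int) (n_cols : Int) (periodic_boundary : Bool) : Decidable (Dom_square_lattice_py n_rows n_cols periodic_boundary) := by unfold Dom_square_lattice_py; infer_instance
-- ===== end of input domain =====

-- B replaces A's scan of all qubit pairs by a direct double loop over rows and
-- columns emitting each vertex's right/down neighbor edges.


-- ===== PORT A =====
-- itertools.combinations(xs, 2) in Python's order
def pvComb2 : List Int → List (Int × Int)
  | [] => []
  | x :: rest => rest.map (fun y => (x, y)) ++ pvComb2 rest

def square_lattice_py (n_rows : Int) (n_cols : Int) (periodic_boundary : Bool) : List (Int × Int) :=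
  let n_qubits := n_rows * n_cols
  (pvComb2 (PySem.List.pyRange 0 n_qubits 1)).filter
    (fun p => (decide (0 < PySem.Int.mod p.2 n_cols) && decide (p.2 - p.1 = 1)) || decide (p.2 - p.1 = n_cols))

-- ===== PORT B =====
def square_lattice_py_alt (n_rows : Int) (n_cols : Int) (periodic_boundary : Bool) : List (Int × Int) :=
  (PySem.List.pyRange 0 n_rows 1).foldl (fun acc i =>
    (PySem.List.pyRange 0 n_cols 1).foldl (fun acc2 j =>
      let s := i * n_cols + j
      let acc3 := if j < n_cols - 1 then acc2 ++ [(s, s + 1)] else acc2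
      if i < n_rows - 1 then acc3 ++ [(s, s + n_cols)] else acc3) acc) []

-- ===== PRECONDITION & SPEC =====
-- Pre_ excludes only periodic_boundary = true, where the Python A raises NotImplementedError.
def Pre_square_lattice_py (n_rows : Int) (n_cols : Int) (periodic_boundary : Bool) : Prop :=
  periodic_boundary = false
instance (n_rows : Int) (n_cols : Int) (periodic_boundary : Bool) : Decidable (Pre_square_lattice_py n_rows n_cols periodic_boundary) := by unfold Pre_square_lattice_py; infer_instance

def pvWitness_square_lattice_py : Int × Int × Bool := (2, 3, false)

def Spec_square_lattice_py (n_rows : Int) (n_cols : Int) (periodic_boundary : Bool) (out : List (Int × Int)) : Prop := out = square_lattice_py_alt n_rows n_cols periodic_boundary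
instance (n_rows : Int) (n_cols : Int) (periodic_boundary : Bool) (out : List (Int × Int)) : Decidable (Spec_square_lattice_py n_rows n_cols periodic_boundary out) := by unfold Spec_square_lattice_py; infer_instance

-- ===== CLAIM (what is proved, stated in full; the proofs are below) =====
def Claim_equal_square_lattice_py : Prop := ∀ (n_rows : Int) (n_cols : Int) (periodic_boundary : Bool), Dom_square_lattice_py n_rows n_cols periodic_boundary → Pre_square_lattice_py n_rows n_cols periodic_boundary → Spec_square_lattice_py n_rows n_cols periodic_boundary (square_lattice_py n_rows n_cols periodic_boundary)

-- ===== LEMMAS AND PROOFS =====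

-- every pair produced by pvComb2 on an increasing range has first < second
theorem pvComb2_range_lt (n : Int) : ∀ (k : Nat) (a : Int), (n - a).toNat ≤ k →
    ∀ p ∈ pvComb2 (PySem.List.pyRange a n 1), p.1 < p.2 := by
  intro k
  induction k with
  | zero =>
    intro a ha p hp
    rw [PySem.List.pyRange_one_eq_nil (by omega)] at hp
    simp [pvComb2] at hp
  | succ k ih =>
    intro a ha p hp
    by_cases h : n ≤ a
    · rw [PySem.List.pyRange_one_eq_nil h] at hp; simp [pvComb2] at hp
    · rw [PySem.List.pyRange_one_cons (by omega)] at hp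
      simp only [pvComb2, List.mem_append, List.mem_map] at hp
      rcases hp with ⟨y, hy, rfl⟩ | hp
      · have := (PySem.List.mem_pyRange_one).1 hy; simp; omega
      · exact ih (a+1) (by omega) p hp

-- normal form of A's combinations-filter as a flatMap over start points
theorem pvComb2_filter_flat (n : Int) (q : Int × Int → Bool) : ∀ (k : Nat) (a : Int), (n - a).toNat ≤ k →
    (pvComb2 (PySem.List.pyRange a n 1)).filter q
      = (PySem.List.pyRange a n 1).flatMap
          (fun s => ((PySem.List.pyRange (s+1) n 1).filter (fun y => q (s, y))).map (fun y => (s, y))) := by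
  intro k
  induction k with
  | zero =>
    intro a ha
    rw [PySem.List.pyRange_one_eq_nil (by omega)]
    simp [pvComb2]
  | succ k ih =>
    intro a ha
    by_cases h : n ≤ a
    · rw [PySem.List.pyRange_one_eq_nil h]; simp [pvComb2]
    · rw [PySem.List.pyRange_one_cons (by omega)]
      simp only [pvComb2, List.filter_append, List.flatMap_cons, List.filter_map]
      rw [ih (a+1) (by omega)]
      congr 1

-- filter for a single point out of a range
theorem pyFilter_single (v a b : Int) :
    (PySem.List.pyRange a b 1).filter (fun y => decide (y = v))
      = if a ≤ v ∧ v < b then [v] else [] := by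
  by_cases h : a ≤ v ∧ v < b
  · rw [if_pos h,
        PySem.List.pyRange_one_append a (v+1) b (by omega) (by omega),
        PySem.List.pyRange_one_append a v (v+1) (by omega) (by omega),
        PySem.List.pyRange_one_singleton]
    have e1 : (PySem.List.pyRange a v 1).filter (fun y => decide (y = v)) = [] :=
      List.filter_eq_nil_iff.2 (by
        intro x hx; rw [PySem.List.mem_pyRange_one] at hx; simp; omega)
    have e2 : (PySem.List.pyRange (v+1) b 1).filter (fun y => decide (y = v)) = [] :=
      List.filter_eq_nil_iff.2 (by
        intro x hx; rw [PySem.List.mem_pyRange_one] at hx; simp; omega)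
    simp only [List.filter_append, e1, e2, List.filter_singleton]
    simp
  · rw [if_neg h]
    refine List.filter_eq_nil_iff.2 (fun x hx => ?_)
    have := (PySem.List.mem_pyRange_one).1 hx; simp; omega

-- the inner filter of A's normal form, evaluated for positive n_cols
theorem inner_filter (c n s : Int) (hc : 0 < c) :
    (PySem.List.pyRange (s+1) n 1).filter
        (fun y => (decide (0 < PySem.Int.mod y c) && decide (y - s = 1)) || decide (y - s = c))
      = (if 0 < PySem.Int.mod (s+1) c ∧ s+1 < n then [s+1] else [])
        ++ (if s+c < n then [s+c] else []) := by
  by_cases hb : s+1 < n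
  · rw [PySem.List.pyRange_one_cons (by omega), List.filter_cons]
    have tail : (PySem.List.pyRange (s+1+1) n 1).filter
        (fun y => (decide (0 < PySem.Int.mod y c) && decide (y - s = 1)) || decide (y - s = c))
        = if s+2 ≤ s+c ∧ s+c < n then [s+c] else [] := by
      rw [show (s:Int)+1+1 = s+2 from by ring]
      rw [List.filter_congr (q := fun y => decide (y = s+c)) (by
        intro y hy
        rw [PySem.List.mem_pyRange_one] at hy
        have h1 : decide (y - s = 1) = false := by simp; omega
        have h2 : decide (y - s = c) = decide (y = s + c) := by
          by_cases hyc : y = s + c <;> simp [hyc] <;> omega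
        rw [h1, h2]
        simp)]
      exact pyFilter_single (s+c) (s+2) n
    rw [tail]
    have e0 : (s:Int)+1-s = 1 := by ring
    by_cases hc1 : c = 1
    · subst hc1
      simp [hb, e0]
    · have h2c : 2 ≤ c := by omega
      have hd : decide ((s:Int)+1-s = c) = false := by simp; omega
      have econd : (if s+2 ≤ s+c ∧ s+c < n then [s+c] else [])
          = (if s+c < n then [s+c] else []) := by
        split_ifs <;> first | rfl | (exfalso; omega)
      have hpred : ((decide (0 < PySem.Int.mod (s+1) c) && decide ((s:Int)+1 - s = 1))
          || decide ((s:Int)+1-s = c)) = decide (0 < PySem.Int.mod (s+1) c) := by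
        have hA : decide ((s:Int)+1 - s = 1) = true := by simp
        rw [hA, hd, Bool.and_true, Bool.or_false]
      rw [econd, hpred]
      by_cases hm : 0 < PySem.Int.mod (s+1) c
      · simp [hm, hb]
      · simp [hm]
  · rw [PySem.List.pyRange_one_eq_nil (by omega)]
    rw [if_neg (by omega), if_neg (by omega)]
    rfl

-- B as a flatMap
theorem alt_flat (r c : Int) (pb : Bool) :
    square_lattice_py_alt r c pb
      = (PySem.List.pyRange 0 r 1).flatMap (fun i =>
          (PySem.List.pyRange 0 c 1).flatMap (fun j =>
            (if j < c - 1 then [(i*c+j, i*c+j+1)] else []) ++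
            (if i < r - 1 then [(i*c+j, i*c+j+c)] else []))) := by
  unfold square_lattice_py_alt
  have inner : ∀ (i : Int) (acc : List (Int × Int)),
      (PySem.List.pyRange 0 c 1).foldl (fun acc2 j =>
        let s := i * c + j
        let acc3 := if j < c - 1 then acc2 ++ [(s, s + 1)] else acc2
        if i < r - 1 then acc3 ++ [(s, s + c)] else acc3) acc
      = acc ++ (PySem.List.pyRange 0 c 1).flatMap (fun j =>
          (if j < c - 1 then [(i*c+j, i*c+j+1)] else []) ++
          (if i < r - 1 then [(i*c+j, i*c+j+c)] else [])) := by
    intro i acc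
    rw [PySem.List.foldl_congr_mem _ _
        (fun acc2 j => acc2 ++
          ((if j < c - 1 then [(i*c+j, i*c+j+1)] else []) ++
           (if i < r - 1 then [(i*c+j, i*c+j+c)] else []))) _
        (by intro acc2 j hj; simp only []; split_ifs <;> simp)]
    exact PySem.List.foldl_append_eq_flatMap _ _ _
  rw [PySem.List.foldl_congr_mem _ _
      (fun acc i => acc ++ (PySem.List.pyRange 0 c 1).flatMap (fun j =>
          (if j < c - 1 then [(i*c+j, i*c+j+1)] else []) ++
          (if i < r - 1 then [(i*c+j, i*c+j+c)] else []))) _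
      (by intro acc i hi; exact inner i acc)]
  rw [PySem.List.foldl_append_eq_flatMap]
  simp

-- range over a product splits into blocks
theorem pyRange_mul (c : Int) (hc : 0 < c) : ∀ (m : Nat),
    PySem.List.pyRange 0 ((m : Int) * c) 1
      = (PySem.List.pyRange 0 (m : Int) 1).flatMap (fun i => (PySem.List.pyRange 0 c 1).map (fun j => i * c + j)) := by
  intro m
  induction m with
  | zero => simp [PySem.List.pyRange_one_eq_nil]
  | succ m ih =>
    have h1 : ((m+1 : Nat) : Int) * c = (m : Int) * c + c := by push_cast; ring
    have h2 : ((m+1 : Nat) : Int) = (m : Int) + 1 := by push_cast; ring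
    rw [h1, h2,
        PySem.List.pyRange_one_append 0 ((m : Int) * c) ((m : Int) * c + c)
          (by positivity) (by omega),
        PySem.List.pyRange_one_succ_right (by positivity), ih]
    simp only [List.flatMap_append, List.flatMap_cons, List.flatMap_nil, List.append_nil]
    congr 1
    rw [PySem.List.pyRange_one, PySem.List.pyRange_one]
    simp [List.map_map, Function.comp]

-- the two per-cell conditions agree on lattice coordinates
theorem cell_eq (r c i j : Int) (hc : 0 < c) (hi : 0 ≤ i ∧ i < r) (hj : 0 ≤ j ∧ j < c) :
    ((if 0 < PySem.Int.mod (i*c+j+1) c ∧ i*c+j+1 < r*c then [(i*c+j, i*c+j+1)] else [])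
      ++ (if i*c+j+c < r*c then [(i*c+j, i*c+j+c)] else []))
    = ((if j < c - 1 then [(i*c+j, i*c+j+1)] else []) ++
       (if i < r - 1 then [(i*c+j, i*c+j+c)] else [])) := by
  have hmod : PySem.Int.mod (i*c+j+1) c = (j+1) % c := by
    rw [PySem.Int.mod_eq_emod_of_pos hc]
    have : i*c+j+1 = (j+1) + c*i := by ring
    rw [this, Int.add_mul_emod_self_left]
  have hmv : (j+1) % c = if j < c - 1 then j+1 else 0 := by
    by_cases hjc : j < c - 1
    · rw [if_pos hjc]; exact Int.emod_eq_of_lt (by omega) (by omega)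
    · rw [if_neg hjc]
      have : j + 1 = c := by omega
      simp [this]
  have hup : i*c + c ≤ r*c := by
    have := mul_le_mul_of_nonneg_right (show i+1 ≤ r by omega) (le_of_lt hc)
    linarith [this]
  congr 1
  · by_cases hjc : j < c - 1
    · rw [if_pos hjc, if_pos ⟨by rw [hmod, hmv, if_pos hjc]; omega, by omega⟩]
    · rw [if_neg hjc, if_neg (by rw [hmod, hmv, if_neg hjc]; omega)]
  · by_cases hir : i < r - 1
    · rw [if_pos hir, if_pos (by
        have := mul_le_mul_of_nonneg_right (show i+2 ≤ r by omega) (le_of_lt hc)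
        nlinarith)]
    · rw [if_neg hir, if_neg (by
        have hieq : i = r - 1 := by omega
        subst hieq
        have : (r-1)*c + c = r*c := by ring
        omega)]

-- the main equality
theorem main_eq (r c : Int) (pb : Bool) :
    square_lattice_py r c pb = square_lattice_py_alt r c pb := by
  unfold square_lattice_py
  simp only []
  by_cases hc : 0 < c
  · by_cases hr : 0 < r
    · -- main case
      have hn : 0 < r*c := mul_pos hr hc
      rw [pvComb2_filter_flat (r*c) _ (r*c).toNat 0 (by omega)]
      have step1 : ∀ s : Int,
          ((PySem.List.pyRange (s+1) (r*c) 1).filter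
            (fun y => (decide (0 < PySem.Int.mod y c) && decide (y - s = 1)) || decide (y - s = c))).map
            (fun y => (s, y))
          = (if 0 < PySem.Int.mod (s+1) c ∧ s+1 < r*c then [(s, s+1)] else [])
            ++ (if s+c < r*c then [(s, s+c)] else []) := by
        intro s
        rw [inner_filter c (r*c) s hc]
        simp [List.map_append, apply_ite (List.map (fun y => ((s:Int), y)))]
      rw [List.flatMap_congr (fun s _ => step1 s)]
      have hrc : ((r.toNat : Int)) = r := by omega
      have hsplit := pyRange_mul c hc r.toNat
      rw [hrc] at hsplit
      rw [alt_flat, hsplit, List.flatMap_assoc]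
      refine List.flatMap_congr (fun i hi => ?_)
      rw [List.flatMap_map]
      refine List.flatMap_congr (fun j hj => ?_)
      rw [PySem.List.mem_pyRange_one] at hi hj
      exact cell_eq r c i j hc ⟨by omega, by omega⟩ ⟨by omega, by omega⟩
    · -- r ≤ 0: n = r*c ≤ 0, both sides empty
      have hn : r*c ≤ 0 := mul_nonpos_iff.2 (Or.inr ⟨by omega, by omega⟩)
      rw [PySem.List.pyRange_one_eq_nil (a := 0) (b := r*c) (by omega), alt_flat,
          PySem.List.pyRange_one_eq_nil (a := 0) (b := r) (by omega)]
      simp [pvComb2]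
  · by_cases hn : 0 < r*c
    · -- c ≤ 0 with r*c > 0 forces c < 0 and r < 0: filter keeps nothing, B's outer range empty
      have hc' : c < 0 := by
        rcases lt_trichotomy c 0 with h | h | h
        · exact h
        · subst h; simp at hn
        · omega
      have hr' : r < 0 := by nlinarith
      rw [List.filter_eq_nil_iff.2 (by
        intro p hp
        have hlt := pvComb2_range_lt (r*c) (r*c).toNat 0 (by omega) p hp
        have hm := PySem.Int.mod_neg_bounds p.2 (b := c) hc'
        simp; omega)]
      rw [alt_flat, PySem.List.pyRange_one_eq_nil (a := 0) (b := r) (by omega)]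
      simp
    · -- c ≤ 0 and n ≤ 0: A's range is empty, B's inner loop range is empty
      rw [PySem.List.pyRange_one_eq_nil (a := 0) (b := r*c) (by omega), alt_flat,
          PySem.List.pyRange_one_eq_nil (a := 0) (b := c) (by omega)]
      simp [pvComb2]

-- ===== VERDICT (by name: the statement is the Claim_ definition above) =====
theorem square_lattice_py_spec : Claim_equal_square_lattice_py := by
  intro r c pb _ _
  unfold Spec_square_lattice_py
  exact main_eq r c pb
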